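-- pv_equiv track=rewrite | github.com/AndreyMeshkov/codewars-python | 6kyu/Are we alternate.py | is_alt
-- ===== SOURCE A (Python) =====
-- def is_alt(s):
--     vowels = ("a", "e", "i", "o", "u")
--     if s[0] in vowels:
--         if all([s[i] in vowels for i in range(len(s)) if i % 2 == 0]):
--             if all([s[i] not in vowels for i in range(len(s)) if i % 2 == 1]):
--                 return True
--     elif s[1] in vowels:
--         if all([s[i] in vowels for i in range(len(s)) if i % 2 == 1]):
--             if all([s[i] not in vowels for i in range(len(s)) if i % 2 == 0]):
--                 return True
--     return False
-- ===== SOURCE B (Python) =====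
-- def is_alt(s):
--     vowels = "aeiou"
--     return all((s[i] in vowels) != (s[i + 1] in vowels) for i in range(len(s) - 1))
-- ===== Notes on version B (the rewrite author's own statement) =====
-- stated objective: simpler
-- what changed: Replaces the parity-based even/odd position analysis (four fully materialised list comprehensions selected by the first character's vowel-ness) with a single short-circuiting adjacent-pair scan checking that every neighbouring pair differs in vowel-ness.
import Mathlib
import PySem

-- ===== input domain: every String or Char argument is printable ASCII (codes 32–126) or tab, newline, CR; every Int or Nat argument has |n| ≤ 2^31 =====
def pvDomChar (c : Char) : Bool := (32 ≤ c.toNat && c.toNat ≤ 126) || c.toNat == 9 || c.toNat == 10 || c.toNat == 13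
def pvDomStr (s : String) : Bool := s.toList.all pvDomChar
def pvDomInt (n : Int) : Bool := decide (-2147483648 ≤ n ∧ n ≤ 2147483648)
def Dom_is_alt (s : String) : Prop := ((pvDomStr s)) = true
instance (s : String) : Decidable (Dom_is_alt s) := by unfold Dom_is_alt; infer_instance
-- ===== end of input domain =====

-- B replaces A's even/odd parity analysis with a single adjacent-pair scan; same values wherever A returns.

-- ===== PORT A =====
-- shared character test: s[i] in vowels (indices used are always in range on Pre_)
def pvVowels : List Char := ['a', 'e', 'i', 'o', 'u']
def pvIsV (cs : List Char) (i : Int) : Bool := pvVowels.contains (PySem.List.pyGetD cs i ' ')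

def is_alt (s : String) : Bool :=
  let cs := s.toList
  let n : Int := (cs.length : Int)
  if pvIsV cs 0 then          -- s[0] in vowels  (IndexError on "" is excluded by Pre_)
    if ((PySem.List.pyRange 0 n 1).filter (fun i => PySem.Int.mod i 2 == 0)).all
        (fun i => pvIsV cs i) then
      if ((PySem.List.pyRange 0 n 1).filter (fun i => PySem.Int.mod i 2 == 1)).all
          (fun i => !pvIsV cs i) then
        true
      else false
    else false
  else if pvIsV cs 1 then     -- elif s[1] in vowels (IndexError on len-1 consonant excluded by Pre_)
    if ((PySem.List.pyRange 0 n 1).filter (fun i => PySem.Int.mod i 2 == 1)).all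
        (fun i => pvIsV cs i) then
      if ((PySem.List.pyRange 0 n 1).filter (fun i => PySem.Int.mod i 2 == 0)).all
          (fun i => !pvIsV cs i) then
        true
      else false
    else false
  else false

-- ===== PORT B =====
def is_alt_alt (s : String) : Bool :=
  let cs := s.toList
  (PySem.List.pyRange 0 ((cs.length : Int) - 1) 1).all
    (fun i => pvIsV cs i != pvIsV cs (i + 1))

-- ===== PRECONDITION & SPEC =====
-- Pre_ excludes exactly the inputs where A raises IndexError: the empty string (s[0]),
-- and a single-character string whose character is not a vowel (s[1]).
def Pre_is_alt (s : String) : Prop :=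
  s.toList ≠ [] ∧ (pvIsV s.toList 0 = false → 2 ≤ s.toList.length)
instance (s : String) : Decidable (Pre_is_alt s) := by unfold Pre_is_alt; infer_instance
def pvWitness_is_alt : String := "amazon"

def Spec_is_alt (s : String) (out : Bool) : Prop := out = is_alt_alt s
instance (s : String) (out : Bool) : Decidable (Spec_is_alt s out) := by unfold Spec_is_alt; infer_instance

-- ===== CLAIM (what is proved, stated in full; the proofs are below) =====
def Claim_equal_is_alt : Prop := ∀ (s : String), Dom_is_alt s → Pre_is_alt s → Spec_is_alt s (is_alt s)

-- ===== LEMMAS AND PROOFS =====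

-- nat-indexed view of the character test
def pvV (cs : List Char) (i : Nat) : Bool := pvVowels.contains (cs.getD i ' ')

lemma pvIsV_natCast (cs : List Char) (i : Nat) : pvIsV cs (i : Int) = pvV cs i := by
  simp [pvIsV, pvV, PySem.List.pyGetD_natCast]

lemma all_pyRange_iff (p : Int → Bool) (n : Nat) :
    ((PySem.List.pyRange 0 (n : Int) 1).all p = true) ↔ ∀ i : Nat, i < n → p (i : Int) = true := by
  simp only [List.all_eq_true, PySem.List.mem_pyRange_one]
  constructor
  · intro h i hi
    exact h (i : Int) ⟨by positivity, by exact_mod_cast hi⟩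
  · intro h x ⟨h0, hx⟩
    have := h x.toNat (by omega)
    simpa [Int.toNat_of_nonneg h0] using this

lemma all_filter_parity (q : Int → Bool) (n : Nat) (k : Int) (km : Nat) (hk : k = (km : Int)) :
    (((PySem.List.pyRange 0 (n : Int) 1).filter (fun i => PySem.Int.mod i 2 == k)).all q = true)
      ↔ ∀ i : Nat, i < n → i % 2 = km → q (i : Int) = true := by
  simp only [List.all_eq_true, List.mem_filter, PySem.List.mem_pyRange_one]
  constructor
  · intro h i hi hp
    refine h (i : Int) ⟨⟨by positivity, by exact_mod_cast hi⟩, ?_⟩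
    have hmi : PySem.Int.mod ((i : Nat) : Int) 2 = ((i % 2 : Nat) : Int) := by
      exact_mod_cast PySem.Int.mod_natCast i 2
    rw [hmi, hp, hk]
    simp
  · intro h x ⟨⟨h0, hx⟩, hm⟩
    have hx' : x = ((x.toNat : Nat) : Int) := by omega
    have hmi : PySem.Int.mod ((x.toNat : Nat) : Int) 2 = ((x.toNat % 2 : Nat) : Int) := by
      exact_mod_cast PySem.Int.mod_natCast x.toNat 2
    rw [hx', hmi, hk] at hm
    have hmk : x.toNat % 2 = km := by exact_mod_cast beq_iff_eq.mp hm
    have := h x.toNat (by omega) hmk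
    simpa [Int.toNat_of_nonneg h0] using this

lemma pvIsV_zero (cs : List Char) : pvIsV cs 0 = pvV cs 0 := by
  simpa using pvIsV_natCast cs 0

lemma pvIsV_one (cs : List Char) : pvIsV cs 1 = pvV cs 1 := by
  simpa using pvIsV_natCast cs 1

lemma ite_nested (c1 c2 : Bool) :
    ((if c1 then (if c2 then true else false) else false) = true) ↔ (c1 = true ∧ c2 = true) := by
  cases c1 <;> cases c2 <;> simp

-- alternation ↔ fixed parity pattern determined by v 0
lemma alt_iff_parity (v : Nat → Bool) (n : Nat) :
    (∀ i, i + 1 < n → v i ≠ v (i + 1)) ↔ (∀ i, i < n → v i = (v 0 != decide (i % 2 = 1))) := by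
  constructor
  · intro h i
    induction i with
    | zero => intro _; simp
    | succ j ih =>
      intro hj
      have hv := ih (by omega)
      have hne := h j (by omega)
      have hpar : ((j + 1) % 2 = 1) ↔ ¬ (j % 2 = 1) := by omega
      cases hb : v 0 <;> cases hj1 : v (j + 1) <;> cases hj0 : v j <;>
        simp_all
  · intro h i hi
    have h1 := h i (by omega)
    have h2 := h (i + 1) (by omega)
    have hpar : ((i + 1) % 2 = 1) ↔ ¬ (i % 2 = 1) := by omega
    cases hb : v 0 <;> cases hp : decide (i % 2 = 1) <;> simp_all

lemma is_alt_alt_iff (s : String) :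
    (is_alt_alt s = true) ↔ ∀ i, i + 1 < s.toList.length → pvV s.toList i ≠ pvV s.toList (i + 1) := by
  set cs := s.toList with hcs
  show ((PySem.List.pyRange 0 ((cs.length : Int) - 1) 1).all _ = true) ↔ _
  have hcast : ((cs.length : Int) - 1) = ((cs.length - 1 : Nat) : Int) ∨ cs.length = 0 := by
    cases cs.length with
    | zero => right; rfl
    | succ m => left; push_cast; omega
  rcases hcast with hc | hc
  · rw [hc, all_pyRange_iff]
    constructor
    · intro h i hi
      have := h i (by omega)
      simp only [pvIsV_natCast] at this
      have h2 : pvIsV cs ((i : Int) + 1) = pvV cs (i + 1) := by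
        rw [show ((i : Int) + 1) = ((i + 1 : Nat) : Int) by push_cast; ring, pvIsV_natCast]
      rw [h2] at this
      simpa using this
    · intro h i hi
      have := h i (by omega)
      simp only [bne_iff_ne, ne_eq]
      rw [pvIsV_natCast, show ((i : Int) + 1) = ((i + 1 : Nat) : Int) by push_cast; ring,
        pvIsV_natCast]
      exact this
  · rw [hc]
    constructor
    · intro _ i hi; omega
    · intro _
      have : ((0 : Int) : Int) - 1 < 0 := by omega
      rw [show ((0 : Nat) : Int) - 1 = (-1 : Int) by ring, PySem.List.pyRange_one_eq_nil (by omega)]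
      simp

-- ===== VERDICT (by name: the statement is the Claim_ definition above) =====
theorem is_alt_spec : Claim_equal_is_alt := by
  intro s _ hpre
  unfold Spec_is_alt
  obtain ⟨hne, hlen⟩ := hpre
  rw [Bool.eq_iff_iff, is_alt_alt_iff, alt_iff_parity (pvV s.toList) s.toList.length]
  simp only [is_alt]
  rw [pvIsV_zero, pvIsV_one]
  cases hb0 : pvV s.toList 0
  · -- first character is a consonant; Pre_ gives a second character
    have h2n : 2 ≤ s.toList.length := hlen (by rw [pvIsV_zero, hb0])
    rw [if_neg (by simp)]
    cases hb1 : pvV s.toList 1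
    · -- two consonants: A returns False, and alternation fails at i = 0
      rw [if_neg (by simp)]
      constructor
      · intro h; simp at h
      · intro h
        exfalso
        have := h 1 (by omega)
        simp [hb1] at this
    · rw [if_pos rfl, ite_nested,
        all_filter_parity (fun i => pvIsV s.toList i) s.toList.length 1 1 (by norm_num),
        all_filter_parity (fun i => !pvIsV s.toList i) s.toList.length 0 0 (by norm_num)]
      constructor
      · rintro ⟨ho, he⟩ i hi
        rcases Nat.mod_two_eq_zero_or_one i with hp | hp
        · have h := he i hi hp
          rw [pvIsV_natCast] at h
          simp at h
          have hd : ¬ (i % 2 = 1) := by omega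
          simp [h, hd]
        · have h := ho i hi hp
          rw [pvIsV_natCast] at h
          simp [h, hp]
      · intro h
        refine ⟨fun i hi hp => ?_, fun i hi hp => ?_⟩
        · have hv := h i hi
          rw [pvIsV_natCast]
          simp [hp] at hv
          simp [hv]
        · have hv := h i hi
          have hd : ¬ (i % 2 = 1) := by omega
          rw [pvIsV_natCast]
          simp [hd] at hv
          simp [hv]
  · -- first character is a vowel
    rw [if_pos rfl, ite_nested,
      all_filter_parity (fun i => pvIsV s.toList i) s.toList.length 0 0 (by norm_num),
      all_filter_parity (fun i => !pvIsV s.toList i) s.toList.length 1 1 (by norm_num)]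
    constructor
    · rintro ⟨he, ho⟩ i hi
      rcases Nat.mod_two_eq_zero_or_one i with hp | hp
      · have h := he i hi hp
        rw [pvIsV_natCast] at h
        have hd : ¬ (i % 2 = 1) := by omega
        simp [h, hd]
      · have h := ho i hi hp
        rw [pvIsV_natCast] at h
        simp at h
        simp [h, hp]
    · intro h
      refine ⟨fun i hi hp => ?_, fun i hi hp => ?_⟩
      · have hv := h i hi
        have hd : ¬ (i % 2 = 1) := by omega
        rw [pvIsV_natCast]
        simp [hd] at hv
        simp [hv]
      · have hv := h i hi
        rw [pvIsV_natCast]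
        simp [hp] at hv
        simp [hv]
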